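-- pv_equiv track=rewrite | github.com/rustamPy/AoCSolutions | tasks/utils.py | left_right_founder
-- ===== SOURCE A (Python) =====
-- def left_right_founder(s: str, reverse: bool) -> str:
--     _map = {
--         'one': '1',
--         'two': '2',
--         'three': '3',
--         'four': '4',
--         'five': '5',
--         'six': '6',
--         'seven': '7',
--         'eight': '8',
--         'nine': '9'
--     }
--
--     # ls = ['one', 'two', 'three', 'four', 'five', 'six', 'seven', 'eight', 'nine']
--
--     if not reverse:
--         for i in range(1, len(s) + 1):
--             substr = s[:i]
--             for k, v in _map.items():
--                 if s[i - 1].isdigit():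
--                     return s[i - 1]
--                 if k in substr:
--                     return v
--     else:
--         for i in range(len(s) - 1, -1, -1):
--             substr = s[i:len(s)]
--             for k, v in _map.items():
--                 if s[i].isdigit():
--                     return s[i]
--                 if k in substr:
--                     return v
--
--                 """
--                 if number in substr:
--                     return str(ind + 1)
--                 """
--     return ''
-- ===== SOURCE B (Python) =====
-- _WORDS = [('one', '1'), ('two', '2'), ('three', '3'), ('four', '4'),
--           ('five', '5'), ('six', '6'), ('seven', '7'), ('eight', '8'),
--           ('nine', '9')]
--
--
-- def left_right_founder(s: str, reverse: bool) -> str: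
--     n = len(s)
--     if not reverse:
--         # single left-to-right pass: at each position, a digit or a word ENDING here
--         for i in range(n):
--             c = s[i]
--             if c.isdigit():
--                 return c
--             for w, v in _WORDS:
--                 if i + 1 >= len(w) and s[i + 1 - len(w):i + 1] == w:
--                     return v
--     else:
--         # single right-to-left pass: at each position, a digit or a word STARTING here
--         for i in range(n - 1, -1, -1):
--             c = s[i]
--             if c.isdigit():
--                 return c
--             for w, v in _WORDS:
--                 if s.startswith(w, i):
--                     return v
--     return ''
-- ===== Notes on version B (the rewrite author's own statement) =====
-- stated objective: faster
-- what changed: Replaced A's scan over growing prefixes/suffixes with an `in`-containment test per step by a single pass that at each position checks for a digit or a fixed-length word match ending (resp. starting) exactly there.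
import Mathlib
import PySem

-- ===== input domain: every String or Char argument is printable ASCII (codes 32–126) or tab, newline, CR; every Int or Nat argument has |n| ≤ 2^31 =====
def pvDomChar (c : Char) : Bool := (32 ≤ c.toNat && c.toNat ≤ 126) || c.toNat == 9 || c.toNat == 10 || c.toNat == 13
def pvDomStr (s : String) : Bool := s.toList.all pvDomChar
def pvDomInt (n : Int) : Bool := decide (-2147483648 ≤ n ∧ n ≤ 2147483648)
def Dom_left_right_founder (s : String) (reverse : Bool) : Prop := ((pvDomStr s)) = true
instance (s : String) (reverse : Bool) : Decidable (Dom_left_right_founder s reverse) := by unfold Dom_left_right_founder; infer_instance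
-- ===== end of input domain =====

-- B replaces A's quadratic growing-prefix/suffix `in`-containment scan by a single pass
-- that checks, at each position, for a digit or a word ending (resp. starting) exactly there.

-- ===== PORT A =====
-- the dict _map, as the ordered list of its items (key, value), both as char lists
def lrfMap : List (List Char × List Char) :=
  [(['o','n','e'], ['1']), (['t','w','o'], ['2']), (['t','h','r','e','e'], ['3']),
   (['f','o','u','r'], ['4']), (['f','i','v','e'], ['5']), (['s','i','x'], ['6']),
   (['s','e','v','e','n'], ['7']), (['e','i','g','h','t'], ['8']), (['n','i','n','e'], ['9'])]

-- inner `for k, v in _map.items()` loop; c = the indexed character, substr = the prefix/suffix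
def lrfInner (c : Char) (substr : List Char) : List (List Char × List Char) → Option (List Char)
  | [] => none
  | (k, v) :: rest =>
    if PySem.Chars.isdigit c then some [c]
    else if PySem.Chars.isIn k substr then some v
    else lrfInner c substr rest

-- forward loop `for i in range(1, len(s)+1)`, written over the 0-based index j = i - 1:
-- substr = s[:i] = take (j+1); s[i-1] = cs[j] (j < len(s) throughout, so getD never defaults)
def lrfFwd (cs : List Char) : List Nat → Option (List Char)
  | [] => none
  | j :: rest =>
    match lrfInner (cs.getD j ' ') (cs.take (j + 1)) lrfMap with
    | some r => some r
    | none => lrfFwd cs rest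

-- backward loop `for i in range(len(s)-1, -1, -1)`; substr = s[i:len(s)] = drop i
def lrfRev (cs : List Char) : List Nat → Option (List Char)
  | [] => none
  | i :: rest =>
    match lrfInner (cs.getD i ' ') (cs.drop i) lrfMap with
    | some r => some r
    | none => lrfRev cs rest

def left_right_founder (s : String) (reverse : Bool) : String :=
  match (if !reverse then lrfFwd s.toList (List.range s.toList.length)
         else lrfRev s.toList ((List.range s.toList.length).reverse)) with
  | some out => String.ofList out
  | none => ""

-- ===== PORT B =====
-- the _WORDS table of Source B: (word, digit character)
def lrfWords : List (List Char × Char) :=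
  [(['o','n','e'], '1'), (['t','w','o'], '2'), (['t','h','r','e','e'], '3'),
   (['f','o','u','r'], '4'), (['f','i','v','e'], '5'), (['s','i','x'], '6'),
   (['s','e','v','e','n'], '7'), (['e','i','g','h','t'], '8'), (['n','i','n','e'], '9')]

-- `if i + 1 >= len(w) and s[i + 1 - len(w):i + 1] == w`; the slice is only taken with a
-- nonnegative start (guarded by the first conjunct), where s[a:i+1] = (drop a).take (i+1-a)
def bWordEnd (cs : List Char) (i : Nat) : List (List Char × Char) → Option Char
  | [] => none
  | (w, v) :: rest =>
    if w.length ≤ i + 1 ∧ (cs.drop (i + 1 - w.length)).take w.length = w then some v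
    else bWordEnd cs i rest

-- `if s.startswith(w, i)`: with 0 ≤ i ≤ len(s) this is startswith of s[i:] — exact here
def bWordStart (cs : List Char) (i : Nat) : List (List Char × Char) → Option Char
  | [] => none
  | (w, v) :: rest =>
    if PySem.Chars.startswith (cs.drop i) w then some v else bWordStart cs i rest

-- forward single pass `for i in range(n)`
def bScanF (cs : List Char) : List Nat → Option Char
  | [] => none
  | i :: rest =>
    if PySem.Chars.isdigit (cs.getD i ' ') then some (cs.getD i ' ')
    else match bWordEnd cs i lrfWords with
      | some v => some v
      | none => bScanF cs rest

-- backward single pass `for i in range(n - 1, -1, -1)`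
def bScanR (cs : List Char) : List Nat → Option Char
  | [] => none
  | i :: rest =>
    if PySem.Chars.isdigit (cs.getD i ' ') then some (cs.getD i ' ')
    else match bWordStart cs i lrfWords with
      | some v => some v
      | none => bScanR cs rest

def left_right_founder_alt (s : String) (reverse : Bool) : String :=
  match (if !reverse then bScanF s.toList (List.range s.toList.length)
         else bScanR s.toList ((List.range s.toList.length).reverse)) with
  | some c => String.ofList [c]
  | none => ""

-- ===== PRECONDITION & SPEC =====
def Spec_left_right_founder (s : String) (reverse : Bool) (out : String) : Prop := out = left_right_founder_alt s reverse
instance (s : String) (reverse : Bool) (out : String) : Decidable (Spec_left_right_founder s reverse out) := by unfold Spec_left_right_founder; infer_instance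

-- ===== CLAIM (what is proved, stated in full; the proofs are below) =====
def Claim_equal_left_right_founder : Prop := ∀ (s : String) (reverse : Bool), Dom_left_right_founder s reverse → Spec_left_right_founder s reverse (left_right_founder s reverse)

-- ===== LEMMAS AND PROOFS =====

-- A's dict is B's word table with the value characters boxed into one-char strings
theorem lrfMap_eq : lrfMap = lrfWords.map (fun p => (p.1, [p.2])) := rfl

theorem lrfWords_keys_ne_nil : ∀ p ∈ lrfWords, p.1 ≠ [] := by decide

-- occurrence characterisation of `w in s[:m]` (m ≤ len): some occurrence fits inside take m
theorem isIn_take_iff (cs w : List Char) (m : Nat) (hm : m ≤ cs.length) :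
    PySem.Chars.isIn w (cs.take m) = true ↔ ∃ j, j + w.length ≤ m ∧ w <+: cs.drop j := by
  rw [← PySem.Chars.exists_prefix_drop_iff_isIn]
  constructor
  · rintro ⟨j, hj⟩
    rw [List.drop_take, List.prefix_take_iff] at hj
    by_cases hjm : j ≤ m
    · exact ⟨j, by omega, hj.1⟩
    · have hw0 : w = [] := List.eq_nil_of_length_eq_zero (by omega)
      exact ⟨0, by simp [hw0], by simp [hw0]⟩
  · rintro ⟨j, hj, hw⟩
    exact ⟨j, by rw [List.drop_take, List.prefix_take_iff]; exact ⟨hw, by omega⟩⟩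

-- under "no occurrence inside s[:i]", `w in s[:i+1]` says exactly: w ends at position i
theorem cond_fwd (cs w : List Char) (i : Nat) (hw : w ≠ []) (hi : i < cs.length)
    (H : PySem.Chars.isIn w (cs.take i) = false) :
    (PySem.Chars.isIn w (cs.take (i + 1)) = true) ↔
      (w.length ≤ i + 1 ∧ (cs.drop (i + 1 - w.length)).take w.length = w) := by
  have hnot : ¬ ∃ j, j + w.length ≤ i ∧ w <+: cs.drop j := by
    rw [← isIn_take_iff cs w i (by omega)]
    simp [H]
  rw [isIn_take_iff cs w (i + 1) (by omega)]
  constructor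
  · rintro ⟨j, hj, hp⟩
    have hji : j = i + 1 - w.length := by
      by_contra hne
      exact hnot ⟨j, by have := List.length_pos_iff.mpr hw; omega, hp⟩
    subst hji
    exact ⟨by have := List.length_pos_iff.mpr hw; omega,
      (List.prefix_iff_eq_take.mp hp).symm⟩
  · rintro ⟨hlen, heq⟩
    exact ⟨i + 1 - w.length, by omega, List.prefix_iff_eq_take.mpr heq.symm⟩

-- under "no occurrence inside s[i+1:]", `w in s[i:]` says exactly: w starts at position i
theorem cond_rev (cs w : List Char) (i : Nat)
    (H : PySem.Chars.isIn w (cs.drop (i + 1)) = false) :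
    (PySem.Chars.isIn w (cs.drop i) = true) ↔ PySem.Chars.startswith (cs.drop i) w = true := by
  rw [PySem.Chars.startswith_iff, ← PySem.Chars.exists_prefix_drop_iff_isIn]
  constructor
  · rintro ⟨j, hj⟩
    cases j with
    | zero => simpa using hj
    | succ j' =>
      exfalso
      have hocc : PySem.Chars.isIn w (cs.drop (i + 1)) = true := by
        rw [← PySem.Chars.exists_prefix_drop_iff_isIn]
        refine ⟨j', ?_⟩
        rw [List.drop_drop] at hj ⊢
        rw [show i + 1 + j' = i + (j' + 1) by omega]
        exact hj
      rw [H] at hocc; exact Bool.false_ne_true hocc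
  · intro h
    exact ⟨0, by simpa using h⟩

-- A's inner word scan = B's end-match scan, position by position (non-digit character)
theorem inner_fwd_eq (cs : List Char) (i : Nat) (hi : i < cs.length)
    (hd : PySem.Chars.isdigit (cs.getD i ' ') = false)
    (tbl : List (List Char × Char))
    (H : ∀ p ∈ tbl, p.1 ≠ [] ∧ PySem.Chars.isIn p.1 (cs.take i) = false) :
    lrfInner (cs.getD i ' ') (cs.take (i + 1)) (tbl.map (fun p => (p.1, [p.2])))
      = (bWordEnd cs i tbl).map (fun c => [c]) := by
  induction tbl with
  | nil => simp [lrfInner, bWordEnd]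
  | cons p rest ih =>
    obtain ⟨w, v⟩ := p
    have hp := H (w, v) (List.mem_cons_self)
    have hcond := cond_fwd cs w i hp.1 hi hp.2
    simp only [List.map_cons, lrfInner, bWordEnd, hd]
    by_cases hc : PySem.Chars.isIn w (cs.take (i + 1)) = true
    · simp [hc, hcond.mp hc]
    · have hc' : ¬ (w.length ≤ i + 1 ∧ (cs.drop (i + 1 - w.length)).take w.length = w) :=
        fun h => hc (hcond.mpr h)
      simp only [Bool.false_eq_true, if_false, hc, if_neg hc']
      exact ih (fun q hq => H q (List.mem_cons_of_mem _ hq))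

theorem inner_rev_eq (cs : List Char) (i : Nat)
    (hd : PySem.Chars.isdigit (cs.getD i ' ') = false)
    (tbl : List (List Char × Char))
    (H : ∀ p ∈ tbl, PySem.Chars.isIn p.1 (cs.drop (i + 1)) = false) :
    lrfInner (cs.getD i ' ') (cs.drop i) (tbl.map (fun p => (p.1, [p.2])))
      = (bWordStart cs i tbl).map (fun c => [c]) := by
  induction tbl with
  | nil => simp [lrfInner, bWordStart]
  | cons p rest ih =>
    obtain ⟨w, v⟩ := p
    have hcond := cond_rev cs w i (H (w, v) (List.mem_cons_self))
    simp only [List.map_cons, lrfInner, bWordStart, hd]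
    by_cases hc : PySem.Chars.isIn w (cs.drop i) = true
    · simp [hc, hcond.mp hc]
    · have hc' : ¬ PySem.Chars.startswith (cs.drop i) w = true := fun h => hc (hcond.mpr h)
      simp only [Bool.false_eq_true, if_false, hc, if_neg hc']
      exact ih (fun q hq => H q (List.mem_cons_of_mem _ hq))

-- if B's end-match scan fails at i, no word occurs inside s[:i+1]
theorem bWordEnd_none (cs : List Char) (i : Nat) (hi : i < cs.length)
    (tbl : List (List Char × Char))
    (H : ∀ p ∈ tbl, p.1 ≠ [] ∧ PySem.Chars.isIn p.1 (cs.take i) = false)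
    (hn : bWordEnd cs i tbl = none) :
    ∀ p ∈ tbl, PySem.Chars.isIn p.1 (cs.take (i + 1)) = false := by
  induction tbl with
  | nil => intro p hp; simp at hp
  | cons q rest ih =>
    obtain ⟨w, v⟩ := q
    have hq := H (w, v) (List.mem_cons_self)
    have hcond := cond_fwd cs w i hq.1 hi hq.2
    simp only [bWordEnd] at hn
    split at hn
    · exact absurd hn (by simp)
    · intro p hp
      rcases List.mem_cons.mp hp with h | h
      · subst h
        exact Bool.eq_false_iff.mpr (fun hc => ‹¬ _› (hcond.mp hc))
      · exact ih (fun q hq => H q (List.mem_cons_of_mem _ hq)) hn p h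

theorem bWordStart_none (cs : List Char) (i : Nat)
    (tbl : List (List Char × Char))
    (H : ∀ p ∈ tbl, PySem.Chars.isIn p.1 (cs.drop (i + 1)) = false)
    (hn : bWordStart cs i tbl = none) :
    ∀ p ∈ tbl, PySem.Chars.isIn p.1 (cs.drop i) = false := by
  induction tbl with
  | nil => intro p hp; simp at hp
  | cons q rest ih =>
    obtain ⟨w, v⟩ := q
    have hcond := cond_rev cs w i (H (w, v) (List.mem_cons_self))
    simp only [bWordStart] at hn
    split at hn
    · exact absurd hn (by simp)
    · intro p hp
      rcases List.mem_cons.mp hp with h | h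
      · subst h
        exact Bool.eq_false_iff.mpr (fun hc => ‹¬ _› (hcond.mp hc))
      · exact ih (fun q hq => H q (List.mem_cons_of_mem _ hq)) hn p h

-- on a digit character A's inner loop answers immediately with that character
theorem innerA_digit (c : Char) (substr : List Char)
    (hd : PySem.Chars.isdigit c = true) : lrfInner c substr lrfMap = some [c] := by
  simp [lrfInner, lrfMap, hd]

-- the forward loops agree from any start position free of earlier occurrences
theorem fwd_eq (cs : List Char) (k : Nat) : ∀ i, i + k = cs.length →
    (∀ p ∈ lrfWords, PySem.Chars.isIn p.1 (cs.take i) = false) →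
    lrfFwd cs (List.range' i k) = (bScanF cs (List.range' i k)).map (fun c => [c]) := by
  induction k with
  | zero => intro i _ _; simp [List.range', lrfFwd, bScanF]
  | succ k ih =>
    intro i hik H
    rw [List.range'_succ]
    have hi : i < cs.length := by omega
    simp only [lrfFwd, bScanF]
    by_cases hd : PySem.Chars.isdigit (cs.getD i ' ') = true
    · rw [innerA_digit _ _ hd, if_pos hd]
      rfl
    · have hd' : PySem.Chars.isdigit (cs.getD i ' ') = false := Bool.eq_false_iff.mpr hd
      have HH : ∀ p ∈ lrfWords, p.1 ≠ [] ∧ PySem.Chars.isIn p.1 (cs.take i) = false :=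
        fun p hp => ⟨lrfWords_keys_ne_nil p hp, H p hp⟩
      rw [lrfMap_eq, inner_fwd_eq cs i hi hd' lrfWords HH, if_neg hd]
      cases hB : bWordEnd cs i lrfWords with
      | some v => rfl
      | none => exact ih (i + 1) (by omega) (bWordEnd_none cs i hi lrfWords HH hB)

-- the backward loops agree as long as the dropped tail is occurrence-free
theorem rev_eq (cs : List Char) (k : Nat) : k ≤ cs.length →
    (∀ p ∈ lrfWords, PySem.Chars.isIn p.1 (cs.drop k) = false) →
    lrfRev cs ((List.range k).reverse) = (bScanR cs ((List.range k).reverse)).map (fun c => [c]) := by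
  induction k with
  | zero => intro _ _; simp [lrfRev, bScanR]
  | succ k ih =>
    intro hk H
    rw [List.range_succ, List.reverse_append, List.reverse_singleton, List.singleton_append]
    have hk' : k < cs.length := by omega
    simp only [lrfRev, bScanR]
    by_cases hd : PySem.Chars.isdigit (cs.getD k ' ') = true
    · rw [innerA_digit _ _ hd, if_pos hd]
      rfl
    · have hd' : PySem.Chars.isdigit (cs.getD k ' ') = false := Bool.eq_false_iff.mpr hd
      rw [lrfMap_eq, inner_rev_eq cs k hd' lrfWords H, if_neg hd]
      cases hB : bWordStart cs k lrfWords with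
      | some v => rfl
      | none => exact ih (by omega) (bWordStart_none cs k lrfWords H hB)

-- ===== VERDICT (by name: the statement is the Claim_ definition above) =====
theorem left_right_founder_spec : Claim_equal_left_right_founder := by
  intro s reverse _
  unfold Spec_left_right_founder left_right_founder left_right_founder_alt
  cases reverse with
  | false =>
    simp only [Bool.not_false, if_true, List.range_eq_range']
    rw [fwd_eq s.toList s.toList.length 0 (by omega)
      (by simp only [List.take_zero]; decide)]
    cases bScanF s.toList (List.range' 0 s.toList.length) with
    | none => rfl
    | some c => rfl
  | true =>
    simp only [Bool.not_true]
    rw [rev_eq s.toList s.toList.length (by omega)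
      (by simp only [List.drop_length]; decide)]
    cases bScanR s.toList ((List.range s.toList.length).reverse) with
    | none => rfl
    | some c => rfl
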